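-- pv_equiv track=rewrite | github.com/AstraeLabs/StreamingCommunity | VibraVid/core/utils/codec.py | get_codec_extension
-- ===== SOURCE A (Python) =====
-- CODEC_EXTENSION_MAP: dict[str, str] = {
--     # Video
--     "avc1":  "mp4",
--     "hvc1":  "mp4",
--     "hev1":  "mp4",
--     "av01":  "mp4",
--     "vp09":  "webm",
--     "vp08":  "webm",
--     "dvhe":  "mp4",
--     "dvh1":  "mp4",
--
--     # Audio
--     "mp4a":  "m4a",
--     "ec-3":  "m4a",
--     "ac-3":  "m4a",
--     "opus":  "webm",
--     "flac":  "flac",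
--     "alac":  "m4a",
--
--     # Subtitle
--     "wvtt":  "vtt",
--     "stpp":  "ttml",
--     "ttml":  "ttml",
--     "srt":   "srt",
--     "ass":   "ass",
--     "ssa":   "ssa",
-- }
--
-- def get_codec_extension(codec_str: str, default: str = "mp4") -> str:
--     """
--     Return the preferred file extension for a codec string.
--
--     Performs prefix matching (e.g. 'avc1.640028' → 'mp4').
--     """
--     if not codec_str:
--         return default
--     c = codec_str.strip().lower()
--     for prefix, ext in CODEC_EXTENSION_MAP.items():
--         if c.startswith(prefix):
--             return ext
--     return default
-- ===== SOURCE B (Python) =====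
-- CODEC_EXTENSION_MAP: dict[str, str] = {
--     # Video
--     "avc1":  "mp4",
--     "hvc1":  "mp4",
--     "hev1":  "mp4",
--     "av01":  "mp4",
--     "vp09":  "webm",
--     "vp08":  "webm",
--     "dvhe":  "mp4",
--     "dvh1":  "mp4",
--
--     # Audio
--     "mp4a":  "m4a",
--     "ec-3":  "m4a",
--     "ac-3":  "m4a",
--     "opus":  "webm",
--     "flac":  "flac",
--     "alac":  "m4a",
--
--     # Subtitle
--     "wvtt":  "vtt",
--     "stpp":  "ttml",
--     "ttml":  "ttml",
--     "srt":   "srt",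
--     "ass":   "ass",
--     "ssa":   "ssa",
-- }
--
-- # Index built once, keyed by the slice of the codec string: no key is a prefix
-- # of another, and all 4-char keys precede all 3-char keys in the map, so a
-- # direct lookup of c[:4] and then c[:3] gives the first startswith match.
-- _EXT4 = {k: v for k, v in CODEC_EXTENSION_MAP.items() if len(k) == 4}
-- _EXT3 = {k: v for k, v in CODEC_EXTENSION_MAP.items() if len(k) == 3}
--
--
-- def get_codec_extension(codec_str: str, default: str = "mp4") -> str:
--     if not codec_str:
--         return default
--     c = codec_str.strip().lower()
--     ext = _EXT4.get(c[:4])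
--     if ext is None:
--         ext = _EXT3.get(c[:3])
--     return default if ext is None else ext
-- ===== Notes on version B (the rewrite author's own statement) =====
-- stated objective: idiomatic
-- what changed: Replaces A's linear startswith scan over all 21 map entries with two slice-keyed dicts (built once, grouped by key length 4 and 3), so each call does two direct c[:4]/c[:3] dict gets instead of up to 21 prefix tests.
import Mathlib
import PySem

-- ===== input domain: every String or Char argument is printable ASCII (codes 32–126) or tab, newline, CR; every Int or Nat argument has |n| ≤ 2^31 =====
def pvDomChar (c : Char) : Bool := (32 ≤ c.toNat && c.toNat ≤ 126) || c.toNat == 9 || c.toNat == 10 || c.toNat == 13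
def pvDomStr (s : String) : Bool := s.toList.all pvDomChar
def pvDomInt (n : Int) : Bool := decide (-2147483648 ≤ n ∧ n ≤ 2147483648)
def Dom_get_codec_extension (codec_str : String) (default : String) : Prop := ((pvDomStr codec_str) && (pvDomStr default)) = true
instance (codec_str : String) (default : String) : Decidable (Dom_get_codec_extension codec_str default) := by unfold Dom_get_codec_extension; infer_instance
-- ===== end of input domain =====

-- B replaces A's linear startswith scan over all 21 map entries by two dicts
-- indexed by the c[:4] / c[:3] slices, built once from the map (idiomatic lookup).

-- ===== PORT A =====
def pvCodecMap : PySem.Dict String String := PySem.Dict.ofList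
  [("avc1", "mp4"), ("hvc1", "mp4"), ("hev1", "mp4"), ("av01", "mp4"),
   ("vp09", "webm"), ("vp08", "webm"), ("dvhe", "mp4"), ("dvh1", "mp4"),
   ("mp4a", "m4a"), ("ec-3", "m4a"), ("ac-3", "m4a"), ("opus", "webm"),
   ("flac", "flac"), ("alac", "m4a"),
   ("wvtt", "vtt"), ("stpp", "ttml"), ("ttml", "ttml"),
   ("srt", "srt"), ("ass", "ass"), ("ssa", "ssa")]

-- the 'for prefix, ext in CODEC_EXTENSION_MAP.items(): if c.startswith(prefix): return ext' loop
def pvScanA (c : String) (items : List (String × String)) (default : String) : String :=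
  match items with
  | [] => default
  | (pfx, ext) :: rest => if PySem.Str.startswith c pfx then ext else pvScanA c rest default

def get_codec_extension (codec_str : String) (default : String) : String :=
  if codec_str = "" then default
  else
    let c := PySem.Str.lower (PySem.Str.strip codec_str)
    pvScanA c pvCodecMap.items default

-- ===== PORT B =====
def pvExt4 : PySem.Dict String String :=
  PySem.Dict.ofList (pvCodecMap.items.filter (fun p => PySem.Str.len p.1 == 4))
def pvExt3 : PySem.Dict String String :=
  PySem.Dict.ofList (pvCodecMap.items.filter (fun p => PySem.Str.len p.1 == 3))

def get_codec_extension_alt (codec_str : String) (default : String) : String :=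
  if codec_str = "" then default
  else
    let c := PySem.Str.lower (PySem.Str.strip codec_str)
    match pvExt4.get? (PySem.Str.slice c none (some 4)) with
    | some e => e
    | none =>
      match pvExt3.get? (PySem.Str.slice c none (some 3)) with
      | some e => e
      | none => default

-- ===== PRECONDITION & SPEC =====
def Spec_get_codec_extension (codec_str : String) (default : String) (out : String) : Prop := out = get_codec_extension_alt codec_str default
instance (codec_str : String) (default : String) (out : String) : Decidable (Spec_get_codec_extension codec_str default out) := by unfold Spec_get_codec_extension; infer_instance

-- ===== CLAIM (what is proved, stated in full; the proofs are below) =====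
def Claim_equal_get_codec_extension : Prop := ∀ (codec_str : String) (default : String), Dom_get_codec_extension codec_str default → Spec_get_codec_extension codec_str default (get_codec_extension codec_str default)

-- ===== LEMMAS AND PROOFS =====

-- the 4-char entries (as listed in pvCodecMap) and the 3-char entries
def pvL4 : List (String × String) :=
  [("avc1", "mp4"), ("hvc1", "mp4"), ("hev1", "mp4"), ("av01", "mp4"),
   ("vp09", "webm"), ("vp08", "webm"), ("dvhe", "mp4"), ("dvh1", "mp4"),
   ("mp4a", "m4a"), ("ec-3", "m4a"), ("ac-3", "m4a"), ("opus", "webm"),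
   ("flac", "flac"), ("alac", "m4a"),
   ("wvtt", "vtt"), ("stpp", "ttml"), ("ttml", "ttml")]
def pvL3 : List (String × String) := [("srt", "srt"), ("ass", "ass"), ("ssa", "ssa")]

lemma pvScanA_append (c : String) (l1 l2 : List (String × String)) (d : String) :
    pvScanA c (l1 ++ l2) d = pvScanA c l1 (pvScanA c l2 d) := by
  induction l1 with
  | nil => rfl
  | cons p rest ih => obtain ⟨k, v⟩ := p; simp [pvScanA, ih]

-- a key of length n matches as a prefix of t iff it equals the slice t.take n
lemma pvKeyMatch (k : String) (n : Nat) (hk : k.toList.length = n) (t : List Char) :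
    (k == String.ofList (t.take n)) = PySem.Chars.startswith t k.toList := by
  rw [Bool.eq_iff_iff, beq_iff_eq, PySem.Chars.startswith, List.isPrefixOf_iff_prefix,
      List.prefix_iff_eq_take, hk]
  constructor
  · intro h; exact (congrArg String.toList h).trans String.toList_ofList
  · intro h; apply String.toList_injective; rw [String.toList_ofList, h]

-- first startswith match over same-length keys IS the dict lookup of the slice
lemma pvScan_eq_get (n : Nat) (pairs : List (String × String))
    (h : ∀ p ∈ pairs, p.1.toList.length = n) (c : String) (d : String) :
    pvScanA c pairs d
      = ((PySem.Dict.mk pairs).get? (String.ofList (c.toList.take n))).getD d := by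
  induction pairs with
  | nil => simp [pvScanA, PySem.Dict.get?]
  | cons p rest ih =>
    obtain ⟨k, v⟩ := p
    rw [pvScanA, PySem.Dict.get?_mk_cons,
        pvKeyMatch k n (h (k, v) (by simp)) c.toList]
    by_cases hb : PySem.Chars.startswith c.toList k.toList
    · simp [hb, PySem.Str.startswith]
    · simp only [hb, Bool.false_eq_true, ite_false]
      rw [if_neg (by simpa [PySem.Str.startswith] using hb)]
      exact ih (fun q hq => h q (List.mem_cons_of_mem _ hq))

lemma pvCore (c d : String) :
    pvScanA c pvCodecMap.items d
      = (match pvExt4.get? (PySem.Str.slice c none (some 4)) with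
         | some e => e
         | none =>
           match pvExt3.get? (PySem.Str.slice c none (some 3)) with
           | some e => e
           | none => d) := by
  have hitems : pvCodecMap.items = pvL4 ++ pvL3 := by decide
  have h4 : pvExt4 = PySem.Dict.mk pvL4 := by decide
  have h3 : pvExt3 = PySem.Dict.mk pvL3 := by decide
  have hs4 : PySem.Str.slice c none (some 4) = String.ofList (c.toList.take 4) := by
    rw [PySem.Str.slice, PySem.Chars.slice, PySem.List.slice_to _ (by omega)]; rfl
  have hs3 : PySem.Str.slice c none (some 3) = String.ofList (c.toList.take 3) := by
    rw [PySem.Str.slice, PySem.Chars.slice, PySem.List.slice_to _ (by omega)]; rfl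
  rw [hitems, pvScanA_append, h4, h3, hs4, hs3,
      pvScan_eq_get 4 pvL4 (by decide) c,
      pvScan_eq_get 3 pvL3 (by decide) c]
  cases (PySem.Dict.mk pvL4).get? (String.ofList (c.toList.take 4)) <;>
    cases (PySem.Dict.mk pvL3).get? (String.ofList (c.toList.take 3)) <;> rfl

-- ===== VERDICT (by name: the statement is the Claim_ definition above) =====
theorem get_codec_extension_spec : Claim_equal_get_codec_extension := by
  intro codec_str default _
  unfold Spec_get_codec_extension get_codec_extension get_codec_extension_alt
  by_cases h : codec_str = ""
  · rw [if_pos h, if_pos h]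
  · rw [if_neg h, if_neg h]
    exact pvCore (PySem.Str.lower (PySem.Str.strip codec_str)) default
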